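-- pv_equiv track=rewrite | github.com/celestia-island/hikari | scripts/utils/enforce_use_group.py | expand_braced_item
-- ===== SOURCE A (Python) =====
-- from typing import List, Optional, Sequence, Tuple
--
-- def normalize_remainder_items(remainder: str) -> List[str]:
--     remainder = remainder.strip()
--     if remainder.startswith("{") and remainder.endswith("}"):
--         inner = remainder[1:-1]
--         parts: List[str] = []
--         cur: List[str] = []
--         depth = 0
--         for ch in inner:
--             if ch == '{':
--                 depth += 1
--                 cur.append(ch)
--             elif ch == '}':
--                 depth -= 1
--                 cur.append(ch)
--             elif ch == ',' and depth == 0: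
--                 part = ''.join(cur).strip()
--                 if part:
--                     parts.append(part)
--                 cur = []
--             else:
--                 cur.append(ch)
--         last = ''.join(cur).strip()
--         if last:
--             parts.append(last)
--         return parts
--     if remainder == "":
--         return []
--     return [remainder]
--
-- def find_matching_brace(s: str, start: int) -> int:
--     """找到与 start 位置的 '{' 匹配的 '}' 的位置。
--
--     返回 '}' 的索引，如果没找到则返回 -1。
--     """
--     if start >= len(s) or s[start] != '{':
--         return -1
--     depth = 0
--     for i in range(start, len(s)):
--         if s[i] == '{':
--             depth += 1
--         elif s[i] == '}':
--             depth -= 1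
--             if depth == 0:
--                 return i
--     return -1
--
-- def expand_braced_item(item: str) -> List[str]:
--     """递归展开单个包含大括号的路径项。
--
--     例如: 'a::b::{C, D::{E, F}}'
--     变成: ['a::b::C', 'a::b::D::E', 'a::b::D::F']
--     """
--     if item == "":
--         return [""]
--
--     # 查找最外层的大括号
--     brace_start = item.find('{')
--     if brace_start == -1:
--         return [item]
--
--     # 确保大括号前面有 ::
--     if brace_start < 2 or item[brace_start-2:brace_start] != "::":
--         return [item]
--
--     brace_end = find_matching_brace(item, brace_start)
--     if brace_end == -1:
--         return [item]
--
--     # 提取前缀和大括号内容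
--     prefix = item[:brace_start-2]  # 去掉 "::"
--     braced_content = item[brace_start:brace_end+1]
--     suffix = item[brace_end+1:]  # 大括号后的内容（通常为空）
--
--     # 解析大括号内的内容
--     inner_items = normalize_remainder_items(braced_content)
--
--     expanded: List[str] = []
--     for inner in inner_items:
--         if inner == "":
--             # self 的情况
--             new_item = prefix + suffix
--         else:
--             new_item = f"{prefix}::{inner}{suffix}"
--         # 递归展开（处理嵌套大括号）
--         expanded.extend(expand_braced_item(new_item))
--
--     return expanded
-- ===== SOURCE B (Python) =====
-- from typing import List, Optional
--
--
-- def normalize_remainder_items(remainder: str) -> List[str]: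
--     remainder = remainder.strip()
--     if remainder.startswith("{") and remainder.endswith("}"):
--         inner = remainder[1:-1]
--         parts: List[str] = []
--         cur: List[str] = []
--         depth = 0
--         for ch in inner:
--             if ch == '{':
--                 depth += 1
--                 cur.append(ch)
--             elif ch == '}':
--                 depth -= 1
--                 cur.append(ch)
--             elif ch == ',' and depth == 0:
--                 part = ''.join(cur).strip()
--                 if part:
--                     parts.append(part)
--                 cur = []
--             else:
--                 cur.append(ch)
--         last = ''.join(cur).strip()
--         if last:
--             parts.append(last)
--         return parts
--     if remainder == "":
--         return []
--     return [remainder]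
--
--
-- def find_matching_brace(s: str, start: int) -> int:
--     if start >= len(s) or s[start] != '{':
--         return -1
--     depth = 0
--     for i in range(start, len(s)):
--         if s[i] == '{':
--             depth += 1
--         elif s[i] == '}':
--             depth -= 1
--             if depth == 0:
--                 return i
--     return -1
--
--
-- def _expand_once(x: str) -> Optional[List[str]]:
--     """One expansion step: None if x has no expandable '::{...}' group,
--     otherwise the list of items it expands into (one per brace alternative)."""
--     if x == "":
--         return None
--     brace_start = x.find('{')
--     if brace_start == -1:
--         return None
--     if brace_start < 2 or x[brace_start-2:brace_start] != "::":
--         return None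
--     brace_end = find_matching_brace(x, brace_start)
--     if brace_end == -1:
--         return None
--     prefix = x[:brace_start-2]
--     suffix = x[brace_end+1:]
--     inner_items = normalize_remainder_items(x[brace_start:brace_end+1])
--     return [prefix + suffix if inner == "" else f"{prefix}::{inner}{suffix}"
--             for inner in inner_items]
--
--
-- def expand_braced_item(item: str) -> List[str]:
--     results: List[str] = []
--     stack = [item]
--     while stack:
--         x = stack.pop()
--         expansion = _expand_once(x)
--         if expansion is None:
--             results.append(x)
--         else:
--             stack.extend(reversed(expansion))
--     return results
-- ===== Notes on version B (the rewrite author's own statement) =====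
-- stated objective: alternative
-- what changed: Replaces A's recursive expansion with an explicit stack-based worklist (_expand_once step function + LIFO stack, children pushed reversed) that produces the same pre-order DFS output iteratively.
import Mathlib
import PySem

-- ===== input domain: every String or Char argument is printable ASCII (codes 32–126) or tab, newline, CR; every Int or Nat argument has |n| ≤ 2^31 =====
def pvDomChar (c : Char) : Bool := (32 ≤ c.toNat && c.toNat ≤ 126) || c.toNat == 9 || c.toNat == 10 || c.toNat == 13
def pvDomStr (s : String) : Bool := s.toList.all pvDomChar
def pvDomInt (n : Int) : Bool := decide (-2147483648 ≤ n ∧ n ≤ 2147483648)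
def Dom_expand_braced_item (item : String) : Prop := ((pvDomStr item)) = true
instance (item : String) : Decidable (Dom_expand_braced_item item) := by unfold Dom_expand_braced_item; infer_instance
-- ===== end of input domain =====

-- B replaces A's recursion by an explicit stack-based worklist (same one-step expansion,
-- LIFO order reproducing A's pre-order DFS); objective: alternative decomposition, same cost.
-- Both recursions are written with an explicit fuel counter that only makes them total in
-- Lean; the fuel passed is proved sufficient (expandFuel_congr / ebiAltLoopFuel_spec below).

-- ===== PORT A =====
-- strings are handled as List Char (PySem.Chars); results are wrapped back with String.ofList

-- helper of find_matching_brace: the 'for i in range(start, len(s))' loop, walking the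
-- remaining characters while carrying the absolute index i and the depth
def fmbGo : List Char → Nat → Int → Int
  | [], _, _ => -1
  | c :: rest, i, depth =>
    if c = '{' then fmbGo rest (i + 1) (depth + 1)
    else if c = '}' then
      (if depth - 1 = 0 then (i : Int) else fmbGo rest (i + 1) (depth - 1))
    else fmbGo rest (i + 1) depth

def find_matching_brace (s : List Char) (start : Int) : Int :=
  if (s.length : Int) ≤ start ∨ ¬ PySem.List.pyGet? s start = some '{' then -1
  else fmbGo (s.drop start.toNat) start.toNat 0

-- helper of normalize_remainder_items: the 'for ch in inner' loop over the remaining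
-- characters, carrying depth, cur and parts; ''.join(cur) is cur itself
def normSplitGo : List Char → Int → List Char → List (List Char) → List (List Char)
  | [], _, cur, parts =>
      let last := PySem.Chars.strip cur
      if last = [] then parts else parts ++ [last]
  | ch :: rest, depth, cur, parts =>
      if ch = '{' then normSplitGo rest (depth + 1) (cur ++ [ch]) parts
      else if ch = '}' then normSplitGo rest (depth - 1) (cur ++ [ch]) parts
      else if ch = ',' ∧ depth = 0 then
        let part := PySem.Chars.strip cur
        normSplitGo rest depth [] (if part = [] then parts else parts ++ [part])
      else normSplitGo rest depth (cur ++ [ch]) parts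

def normalize_remainder_items (remainder : List Char) : List (List Char) :=
  let r := PySem.Chars.strip remainder
  if PySem.Chars.startswith r ['{'] ∧ PySem.Chars.endswith r ['}'] then
    normSplitGo (PySem.Chars.slice r (some 1) (some (-1))) 0 [] []
  else if r = [] then []
  else [r]

-- ---- facts the recursion of the port of A needs for termination (cited in decreasing_by) ----
-- A's recursion ('expanded.extend(expand_braced_item(new_item))' is the foldl); the fuel
-- 'item.length + 1' strictly exceeds the length of every argument down the recursion
def expandFuel : Nat → List Char → List (List Char)
  | 0, item => [item]  -- fuel exhausted: never reached for the fuel expand_braced_item passes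
  | fuel + 1, item =>
    if item = [] then [[]]
    else if PySem.Chars.find item ['{'] = -1 then [item]
    else if PySem.Chars.find item ['{'] < 2 ∨
        ¬ PySem.Chars.slice item (some (PySem.Chars.find item ['{'] - 2)) (some (PySem.Chars.find item ['{'])) = [':', ':'] then [item]
    else if find_matching_brace item (PySem.Chars.find item ['{']) = -1 then [item]
    else
      (normalize_remainder_items (PySem.Chars.slice item (some (PySem.Chars.find item ['{']))
          (some (find_matching_brace item (PySem.Chars.find item ['{']) + 1)))).foldl
        (fun expanded inner =>
          expanded ++ expandFuel fuel
            (if inner = [] then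
              PySem.Chars.slice item none (some (PySem.Chars.find item ['{'] - 2)) ++
                PySem.Chars.slice item (some (find_matching_brace item (PySem.Chars.find item ['{']) + 1)) none
            else
              PySem.Chars.slice item none (some (PySem.Chars.find item ['{'] - 2)) ++ [':', ':'] ++ inner ++
                PySem.Chars.slice item (some (find_matching_brace item (PySem.Chars.find item ['{']) + 1)) none)) []

def expand_braced_item (item : String) : List String :=
  (expandFuel (item.toList.length + 1) item.toList).map String.ofList

-- ===== PORT B =====
-- B (Source B): one expansion step `_expand_once` (none = x is not expandable), driven by an
-- explicit stack-based worklist.  Python's stack is a list popped from its END with the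
-- expansion pushed REVERSED; the port represents that stack head-first, so the pop is the
-- head and the pushed expansion needs no reversal — the same items in the same order.

def ebiAltStep (x : List Char) : Option (List (List Char)) :=
  if x = [] then none
  else if PySem.Chars.find x ['{'] = -1 then none
  else if PySem.Chars.find x ['{'] < 2 ∨
      ¬ PySem.Chars.slice x (some (PySem.Chars.find x ['{'] - 2)) (some (PySem.Chars.find x ['{'])) = [':', ':'] then none
  else if find_matching_brace x (PySem.Chars.find x ['{']) = -1 then none
  else
    some ((normalize_remainder_items (PySem.Chars.slice x (some (PySem.Chars.find x ['{']))
        (some (find_matching_brace x (PySem.Chars.find x ['{']) + 1)))).map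
      (fun inner =>
        if inner = [] then
          PySem.Chars.slice x none (some (PySem.Chars.find x ['{'] - 2)) ++
            PySem.Chars.slice x (some (find_matching_brace x (PySem.Chars.find x ['{']) + 1)) none
        else
          PySem.Chars.slice x none (some (PySem.Chars.find x ['{'] - 2)) ++ [':', ':'] ++ inner ++
            PySem.Chars.slice x (some (find_matching_brace x (PySem.Chars.find x ['{']) + 1)) none))

-- fact the worklist loop needs for termination (cited in decreasing_by)

-- the while-loop; its fuel (one unit per iteration) is the sum of (|x|+1)! over the stack,
-- proved sufficient in ebiAltLoopFuel_spec below
def ebiAltLoopFuel : Nat → List (List Char) → List (List Char) → List (List Char)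
  | 0, _, results => results  -- fuel exhausted: never reached for the fuel passed below
  | _ + 1, [], results => results
  | fuel + 1, x :: rest, results =>
    match ebiAltStep x with
    | none => ebiAltLoopFuel fuel rest (results ++ [x])
    | some ys => ebiAltLoopFuel fuel (ys ++ rest) results

def expand_braced_item_alt (item : String) : List String :=
  (ebiAltLoopFuel ((item.toList.length + 1).factorial + 1) [item.toList] []).map String.ofList

-- ===== PRECONDITION & SPEC =====
def Spec_expand_braced_item (item : String) (out : List String) : Prop := out = expand_braced_item_alt item
instance (item : String) (out : List String) : Decidable (Spec_expand_braced_item item out) := by unfold Spec_expand_braced_item; infer_instance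

-- ===== CLAIM (what is proved, stated in full; the proofs are below) =====
def Claim_equal_expand_braced_item : Prop := ∀ (item : String), Dom_expand_braced_item item → Spec_expand_braced_item item (expand_braced_item item)

-- ===== LEMMAS AND PROOFS =====

lemma strip_length_le (cs : List Char) : (PySem.Chars.strip cs).length ≤ cs.length := by
  simp only [PySem.Chars.strip, PySem.Chars.lstrip, PySem.Chars.rstrip, List.length_reverse]
  calc (List.dropWhile PySem.Chars.isspace (List.dropWhile PySem.Chars.isspace cs).reverse).length
      ≤ (List.dropWhile PySem.Chars.isspace cs).reverse.length := List.length_dropWhile_le _ _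
    _ ≤ cs.length := by simpa using List.length_dropWhile_le PySem.Chars.isspace cs

lemma normSplitGo_len (l : List Char) : ∀ (d : Int) (cur : List Char) (parts : List (List Char)) (B : Nat),
    (∀ q ∈ parts, q.length ≤ B) → cur.length + l.length ≤ B →
    ∀ p ∈ normSplitGo l d cur parts, p.length ≤ B := by
  induction l with
  | nil =>
    intro d cur parts B hp hc p hm
    simp only [normSplitGo] at hm
    split at hm
    · exact hp p hm
    · rcases List.mem_append.1 hm with h | h
      · exact hp p h
      · simp only [List.mem_singleton] at h
        subst h
        exact le_trans (strip_length_le cur) (by simpa using hc)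
  | cons ch rest ih =>
    intro d cur parts B hp hc p hm
    simp only [normSplitGo] at hm
    split at hm
    · exact ih _ _ _ _ hp (by simp at hc ⊢; omega) p hm
    · split at hm
      · exact ih _ _ _ _ hp (by simp at hc ⊢; omega) p hm
      · split at hm
        · refine ih _ _ _ _ ?_ (by simp at hc ⊢; omega) p hm
          intro q hq
          split at hq
          · exact hp q hq
          · rcases List.mem_append.1 hq with h | h
            · exact hp q h
            · simp only [List.mem_singleton] at h
              subst h
              exact le_trans (strip_length_le cur) (by simp at hc ⊢; omega)
        · exact ih _ _ _ _ hp (by simp at hc ⊢; omega) p hm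

lemma normSplitGo_count (l : List Char) : ∀ (d : Int) (cur : List Char) (parts : List (List Char)),
    (normSplitGo l d cur parts).length ≤ parts.length + l.length + 1 := by
  induction l with
  | nil =>
    intro d cur parts
    simp only [normSplitGo]
    split <;> simp
  | cons ch rest ih =>
    intro d cur parts
    simp only [normSplitGo]
    split
    · have := ih (d+1) (cur ++ [ch]) parts; simp at this ⊢; omega
    · split
      · have := ih (d-1) (cur ++ [ch]) parts; simp at this ⊢; omega
      · split
        · have h1 := ih d [] parts
          have h2 := ih d [] (parts ++ [PySem.Chars.strip cur])
          split <;> simp at h1 h2 ⊢ <;> omega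
        · have := ih d (cur ++ [ch]) parts; simp at this ⊢; omega

lemma brace_strip (mid : List Char) :
    PySem.Chars.strip ('{' :: (mid ++ ['}'])) = '{' :: (mid ++ ['}']) := by
  have h1 : PySem.Chars.isspace '{' = false := by decide
  have h2 : PySem.Chars.isspace '}' = false := by decide
  simp [PySem.Chars.strip, PySem.Chars.lstrip, PySem.Chars.rstrip, h1, List.reverse_append, h2]

lemma brace_slice (mid : List Char) :
    PySem.Chars.slice ('{' :: (mid ++ ['}'])) (some 1) (some (-1)) = mid := by
  simp [PySem.Chars.slice_eq_listSlice, PySem.List.slice, PySem.List.clampIdx]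
  rw [if_neg (by omega)]
  simp

lemma normalize_brace_eq (mid : List Char) :
    normalize_remainder_items ('{' :: (mid ++ ['}'])) = normSplitGo mid 0 [] [] := by
  simp only [normalize_remainder_items, brace_strip]
  rw [if_pos, brace_slice]
  constructor
  · simp [PySem.Chars.startswith, List.isPrefixOf]
  · simp only [PySem.Chars.endswith, List.isSuffixOf_iff_suffix]
    exact ⟨'{' :: mid, by simp⟩

lemma normalize_brace_len (mid : List Char) :
    (∀ p ∈ normalize_remainder_items ('{' :: (mid ++ ['}'])), p.length ≤ mid.length) ∧
    (normalize_remainder_items ('{' :: (mid ++ ['}']))).length ≤ mid.length + 1 := by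
  rw [normalize_brace_eq]
  constructor
  · exact normSplitGo_len mid 0 [] [] mid.length (by simp) (by simp)
  · simpa using normSplitGo_count mid 0 [] []

lemma fmbGo_spec (l : List Char) : ∀ (i : Nat) (d : Int), ¬ fmbGo l i d = -1 →
    ∃ k, k < l.length ∧ fmbGo l i d = ((i + k : Nat) : Int) ∧ l.getD k ' ' = '}' ∧
      (l.getD 0 ' ' = '{' → 1 ≤ k) := by
  induction l with
  | nil => intro i d h; simp [fmbGo] at h
  | cons c rest ih =>
    intro i d h
    simp only [fmbGo] at h ⊢
    by_cases hc : c = '{'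
    · simp only [hc] at h ⊢
      obtain ⟨k, hk, he, hg, _⟩ := ih (i+1) (d+1) h
      exact ⟨k+1, by simpa using hk, by rw [he]; push_cast; ring_nf, by simpa using hg, fun _ => by omega⟩
    · simp only [if_neg hc] at h ⊢
      by_cases hc2 : c = '}'
      · simp only [hc2] at h ⊢
        by_cases hd : d - 1 = 0
        · simp only [if_pos hd]
          exact ⟨0, by simp, by simp, by simp, fun hx => by simp at hx⟩
        · simp only [if_neg hd] at h ⊢
          obtain ⟨k, hk, he, hg, _⟩ := ih (i+1) (d-1) h
          refine ⟨k+1, by simpa using hk, by rw [he]; push_cast; ring_nf, by simpa using hg, fun hx => by omega⟩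
      · simp only [if_neg hc2] at h ⊢
        obtain ⟨k, hk, he, hg, _⟩ := ih (i+1) d h
        refine ⟨k+1, by simpa using hk, by rw [he]; push_cast; ring_nf, by simpa using hg, fun hx => ?_⟩
        simp at hx; exact absurd hx hc

-- the central decomposition fact: sizes of prefix/suffix/inner items in the expandable case
lemma ebi_expand_bounds (item : List Char)
    (h1 : ¬ PySem.Chars.find item ['{'] = -1)
    (h2 : ¬ (PySem.Chars.find item ['{'] < 2 ∨
      ¬ PySem.Chars.slice item (some (PySem.Chars.find item ['{'] - 2)) (some (PySem.Chars.find item ['{'])) = [':', ':']))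
    (h4 : ¬ find_matching_brace item (PySem.Chars.find item ['{']) = -1) :
    (normalize_remainder_items (PySem.Chars.slice item (some (PySem.Chars.find item ['{']))
        (some (find_matching_brace item (PySem.Chars.find item ['{']) + 1)))).length ≤ item.length ∧
    ∀ inner ∈ normalize_remainder_items (PySem.Chars.slice item (some (PySem.Chars.find item ['{']))
        (some (find_matching_brace item (PySem.Chars.find item ['{']) + 1))),
      (PySem.Chars.slice item none (some (PySem.Chars.find item ['{'] - 2))).length + inner.length +
        (PySem.Chars.slice item (some (find_matching_brace item (PySem.Chars.find item ['{']) + 1)) none).length + 4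
        ≤ item.length := by
  push_neg at h2
  obtain ⟨h2a, _⟩ := h2
  have hbs0 : 0 ≤ PySem.Chars.find item ['{'] := by omega
  have hble : PySem.Chars.find item ['{'] ≤ (item.length : Int) := PySem.Chars.find_le_length item ['{']
  obtain ⟨hpre, -⟩ := PySem.Chars.find_spec (s := item) (sub := ['{']) hbs0
  set b : Nat := (PySem.Chars.find item ['{']).toNat with hbdef
  have hbcast : PySem.Chars.find item ['{'] = (b : Int) := by omega
  obtain ⟨t, ht⟩ := hpre
  have hblen : b < item.length := by
    by_contra hc
    rw [List.drop_eq_nil_of_le (by omega)] at ht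
    simp at ht
  -- the find_matching_brace guard is false
  have hget : PySem.List.pyGet? item (PySem.Chars.find item ['{']) = some '{' := by
    rw [hbcast, PySem.List.pyGet?_natCast]
    have h0 : (List.drop b item)[0]? = some '{' := by rw [← ht]; simp
    rw [List.getElem?_drop] at h0
    simpa using h0
  have hfmb : find_matching_brace item (PySem.Chars.find item ['{'])
      = fmbGo (item.drop b) b 0 := by
    rw [find_matching_brace, if_neg (by push_neg; exact ⟨by omega, hget⟩), ← hbdef]
  rw [hfmb] at h4
  obtain ⟨k, hk, he, hgk, hg1⟩ := fmbGo_spec (item.drop b) b 0 h4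
  have hk1 : 1 ≤ k := hg1 (by rw [← ht]; simp)
  have hklen : k < item.length - b := by simpa using hk
  -- the three slices
  have hpre_len : (PySem.Chars.slice item none (some (PySem.Chars.find item ['{'] - 2))).length = b - 2 := by
    have : PySem.Chars.find item ['{'] - 2 = ((b - 2 : Nat) : Int) := by omega
    rw [this]
    simp only [PySem.Chars.slice_eq_listSlice, PySem.List.slice_to_natCast]
    simp
    omega
  have hsuf_len : (PySem.Chars.slice item (some (find_matching_brace item (PySem.Chars.find item ['{']) + 1)) none).length
      = item.length - (b + k + 1) := by
    rw [hfmb, he]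
    have : ((b + k : Nat) : Int) + 1 = ((b + k + 1 : Nat) : Int) := by push_cast; ring
    rw [this]
    simp only [PySem.Chars.slice_eq_listSlice, PySem.List.slice_from_natCast]
    simp
  -- braced content decomposition
  have htlen : t.length = item.length - b - 1 := by
    have := congrArg List.length ht
    simp at this
    omega
  obtain ⟨k', hkk⟩ : ∃ k', k = k' + 1 := ⟨k - 1, by omega⟩
  have hkt : k' < t.length := by omega
  have htk : t[k']? = some '}' := by
    rw [← ht] at hgk
    rw [hkk, List.getD_eq_getElem?_getD, List.singleton_append, List.getElem?_cons_succ,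
      List.getElem?_eq_getElem hkt] at hgk
    rw [List.getElem?_eq_getElem hkt]
    simpa using hgk
  have hbraced : PySem.Chars.slice item (some (PySem.Chars.find item ['{']))
      (some (find_matching_brace item (PySem.Chars.find item ['{']) + 1))
      = '{' :: (t.take (k - 1) ++ ['}']) := by
    rw [hfmb, he, hbcast]
    have : ((b + k : Nat) : Int) + 1 = ((b + k + 1 : Nat) : Int) := by push_cast; ring
    rw [this]
    simp only [PySem.Chars.slice_eq_listSlice, PySem.List.slice_natCast]
    have hk' : b + k + 1 - b = k + 1 := by omega
    rw [hk', ← ht, List.singleton_append, List.take_succ_cons, hkk, List.take_add_one, htk]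
    simp
  rw [hbraced]
  obtain ⟨hlen_all, hcount⟩ := normalize_brace_len (t.take (k - 1))
  have htake : (t.take (k-1)).length = k - 1 := by simp; omega
  constructor
  · rw [htake] at hcount; omega
  · intro inner hm
    have := hlen_all inner hm
    rw [htake] at this
    rw [hpre_len, hsuf_len]
    omega


-- the exact decrease fact the recursion cites (kept as a named lemma so the
-- definition's own term stays small)

lemma ebiAltStep_children_lt (x : List Char) (ys : List (List Char)) (h : ebiAltStep x = some ys) :
    (ys.map (fun t => (t.length + 1).factorial)).sum < (x.length + 1).factorial := by
  unfold ebiAltStep at h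
  split_ifs at h with h0 h1 h2 h4
  all_goals try exact Option.noConfusion h
  obtain ⟨hcount, hbound⟩ := ebi_expand_bounds x h1 h2 h4
  have hx0 : x.length ≠ 0 := fun hc => h0 (List.eq_nil_of_length_eq_zero hc)
  have hys := (Option.some.inj h).symm
  have hmax : ∀ f ∈ ys.map (fun t => (t.length + 1).factorial), f ≤ (x.length - 1).factorial := by
    intro f hf
    obtain ⟨y, hy, rfl⟩ := List.mem_map.1 hf
    rw [hys] at hy
    obtain ⟨inner, hin, rfl⟩ := List.mem_map.1 hy
    have := hbound inner hin
    apply Nat.factorial_le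
    split <;> simp only [List.length_append, List.length_cons, List.length_nil] <;> omega
  have hsum := List.sum_le_card_nsmul (ys.map (fun t => (t.length + 1).factorial))
    ((x.length - 1).factorial) hmax
  have hcard : ys.length ≤ x.length := by rw [hys]; simpa using hcount
  calc (ys.map (fun t => (t.length + 1).factorial)).sum
      ≤ (ys.map (fun t => (t.length + 1).factorial)).length • (x.length - 1).factorial := hsum
    _ = ys.length * (x.length - 1).factorial := by simp [smul_eq_mul]
    _ ≤ x.length * (x.length - 1).factorial := Nat.mul_le_mul_right _ hcard
    _ = x.length.factorial := Nat.mul_factorial_pred hx0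
    _ < (x.length + 1).factorial := by
        rw [Nat.factorial_succ]
        exact lt_mul_of_one_lt_left (Nat.factorial_pos _) (by omega)

-- every item a step produces is at least 2 characters shorter than its source
lemma ebiAltStep_child_len (x : List Char) (ys : List (List Char)) (h : ebiAltStep x = some ys) :
    ∀ y ∈ ys, y.length + 2 ≤ x.length := by
  unfold ebiAltStep at h
  split_ifs at h with h0 h1 h2 h4
  all_goals try exact Option.noConfusion h
  intro y hy
  rw [← Option.some.inj h] at hy
  obtain ⟨inner, hin, rfl⟩ := List.mem_map.1 hy
  have := (ebi_expand_bounds x h1 h2 h4).2 inner hin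
  split <;> simp only [List.length_append, List.length_cons, List.length_nil] <;> omega

-- with nonzero fuel, one unfolding of A's recursion is exactly B's step
lemma step_eq_expandFuel (n : Nat) (x : List Char) :
    expandFuel (n + 1) x =
      match ebiAltStep x with
      | none => [x]
      | some ys => ys.flatMap (expandFuel n) := by
  rw [expandFuel, ebiAltStep]
  split_ifs with h0 h1 h2 h4
  · subst h0; rfl
  · rfl
  · rfl
  · rfl
  · rw [PySem.List.foldl_append_eq_flatMap]
    simp only [List.nil_append, List.flatMap_map, Function.comp]

-- any two sufficient fuels compute the same value
lemma expandFuel_congr (n : Nat) : ∀ (m : Nat) (x : List Char), x.length < n → x.length < m →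
    expandFuel n x = expandFuel m x := by
  induction n with
  | zero => intro m x hn; omega
  | succ n ih =>
    intro m x hn hm
    obtain ⟨m', rfl⟩ : ∃ m', m = m' + 1 := ⟨m - 1, by omega⟩
    rw [step_eq_expandFuel, step_eq_expandFuel]
    cases hstep : ebiAltStep x with
    | none => rfl
    | some ys =>
      simp only []
      apply List.flatMap_congr
      intro y hy
      have := ebiAltStep_child_len x ys hstep y hy
      exact ih m' y (by omega) (by omega)

-- the worklist loop, given enough fuel, appends the full expansion of every stacked item
lemma ebiAltLoopFuel_spec (fuel : Nat) : ∀ (stack results : List (List Char)),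
    (stack.map (fun t => (t.length + 1).factorial)).sum < fuel →
    ebiAltLoopFuel fuel stack results
      = results ++ stack.flatMap (fun x => expandFuel (x.length + 1) x) := by
  induction fuel with
  | zero => intro stack results h; omega
  | succ fuel ih =>
    intro stack results h
    match stack with
    | [] => simp [ebiAltLoopFuel]
    | x :: rest =>
      have hx := step_eq_expandFuel x.length x
      cases hstep : ebiAltStep x with
      | none =>
        rw [hstep] at hx
        simp only [ebiAltLoopFuel, hstep]
        rw [ih rest (results ++ [x]) (by
          have := Nat.factorial_pos (x.length + 1)
          simp only [List.map_cons, List.sum_cons] at h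
          omega)]
        simp [hx]
      | some ys =>
        rw [hstep] at hx
        have hsum := ebiAltStep_children_lt x ys hstep
        simp only [ebiAltLoopFuel, hstep]
        rw [ih (ys ++ rest) results (by simp only [List.map_cons, List.sum_cons,
          List.map_append, List.sum_append] at h ⊢; omega)]
        have hflat : ys.flatMap (fun y => expandFuel (y.length + 1) y)
            = ys.flatMap (expandFuel x.length) := by
          apply List.flatMap_congr
          intro y hy
          have := ebiAltStep_child_len x ys hstep y hy
          exact expandFuel_congr (y.length + 1) x.length y (by omega) (by omega)
        simp [hx, hflat, List.flatMap_append]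

-- ===== VERDICT (by name: the statement is the Claim_ definition above) =====
theorem expand_braced_item_spec : Claim_equal_expand_braced_item := by
  intro item _
  unfold Spec_expand_braced_item expand_braced_item expand_braced_item_alt
  rw [ebiAltLoopFuel_spec _ [item.toList] [] (by simp)]
  simp
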